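-- pv_equiv track=rewrite | github.com/cthiounn/adventofcode-2021-python | day18.py | traduct
-- ===== SOURCE A (Python) =====
-- def traduct(st):
--     depth=0
--     a=[]
--     for i,j in enumerate(st):
--         if j =='[':
--             depth+=1
--         elif j==']':
--             depth-=1
--         elif j==",":
--             continue
--         else:
--             a.append((depth,int(j)))
--     return (a)
-- ===== SOURCE B (Python) =====
-- from itertools import accumulate
--
-- def traduct(st):
--     depths = list(accumulate((1 if c == '[' else -1 if c == ']' else 0) for c in st))
--     return [(depths[i], int(c)) for i, c in enumerate(st) if c not in '[],']
-- ===== Notes on version B (the rewrite author's own statement) =====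
-- stated objective: alternative
-- what changed: Replaces the single stateful loop (running depth counter plus append) by a prefix-sum decomposition: a cumulative-depth table built with itertools.accumulate, then a comprehension projecting (depth[i], int(c)) for non-bracket characters.
import Mathlib
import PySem

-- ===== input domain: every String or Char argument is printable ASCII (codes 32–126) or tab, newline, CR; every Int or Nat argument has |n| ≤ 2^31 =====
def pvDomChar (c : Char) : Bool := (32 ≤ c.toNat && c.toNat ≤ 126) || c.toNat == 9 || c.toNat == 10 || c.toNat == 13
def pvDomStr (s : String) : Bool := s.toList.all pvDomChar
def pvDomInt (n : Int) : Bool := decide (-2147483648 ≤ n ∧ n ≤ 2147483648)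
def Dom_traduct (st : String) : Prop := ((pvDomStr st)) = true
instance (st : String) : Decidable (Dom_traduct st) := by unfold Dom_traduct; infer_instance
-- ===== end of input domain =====

-- Same parsing as A via a different decomposition: B precomputes a cumulative-depth
-- table and projects digit positions in a second pass, instead of A's single stateful loop.


-- ===== PORT A =====
-- literal transliteration of A's loop: state (depth, a), int(j) via PySem.Int.ofStr?
-- (Pre_ excludes the inputs where int(j) raises, so the .getD 0 is never reached there)
def traduct (st : String) : List (Int × Int) :=
  (st.toList.foldl (fun (s : Int × List (Int × Int)) j =>
      if j = '[' then (s.1 + 1, s.2)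
      else if j = ']' then (s.1 - 1, s.2)
      else if j = ',' then s
      else (s.1, s.2 ++ [(s.1, (PySem.Int.ofStr? (String.ofList [j])).getD 0)])) (0, [])).2

-- ===== PORT B =====
-- itertools.accumulate over the per-character deltas
def pvAccum (s : Int) : List Int → List Int
  | [] => []
  | d :: ds => (s + d) :: pvAccum (s + d) ds

def traduct_alt (st : String) : List (Int × Int) :=
  let depths := pvAccum 0 (st.toList.map (fun c => if c = '[' then 1 else if c = ']' then -1 else 0))
  (depths.zip st.toList).filterMap (fun dc =>
    if dc.2 = '[' ∨ dc.2 = ']' ∨ dc.2 = ',' then none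
    else some (dc.1, (PySem.Int.ofStr? (String.ofList [dc.2])).getD 0))

-- ===== PRECONDITION & SPEC =====
-- Pre_ excludes exactly the inputs where A's int(j) raises ValueError: any character that
-- is neither a bracket nor a comma nor an ASCII digit.
def Pre_traduct (st : String) : Prop :=
  (st.toList.all (fun c => c == '[' || c == ']' || c == ',' || c.isDigit)) = true
instance (st : String) : Decidable (Pre_traduct st) := by unfold Pre_traduct; infer_instance

def pvWitness_traduct : String := "[[1,2],9]"

def Spec_traduct (st : String) (out : List (Int × Int)) : Prop := out = traduct_alt st
instance (st : String) (out : List (Int × Int)) : Decidable (Spec_traduct st out) := by unfold Spec_traduct; infer_instance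

-- ===== CLAIM (what is proved, stated in full; the proofs are below) =====
def Claim_equal_traduct : Prop := ∀ (st : String), Dom_traduct st → Pre_traduct st → Spec_traduct st (traduct st)

-- ===== LEMMAS AND PROOFS =====

theorem traduct_fold_eq (v : Char → Int) (l : List Char) : ∀ (d : Int) (acc : List (Int × Int)),
    (l.foldl (fun (s : Int × List (Int × Int)) j =>
      if j = '[' then (s.1 + 1, s.2)
      else if j = ']' then (s.1 - 1, s.2)
      else if j = ',' then s
      else (s.1, s.2 ++ [(s.1, v j)])) (d, acc)).2
    = acc ++ ((pvAccum d (l.map (fun c => if c = '[' then 1 else if c = ']' then -1 else 0))).zip l).filterMap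
        (fun dc => if dc.2 = '[' ∨ dc.2 = ']' ∨ dc.2 = ',' then none
          else some (dc.1, v dc.2)) := by
  induction l with
  | nil => intro d acc; simp [pvAccum]
  | cons c l ih =>
    intro d acc
    by_cases h1 : c = '['
    · simp [h1, pvAccum, List.foldl, ih]
    · by_cases h2 : c = ']'
      · simp [h2, pvAccum, List.foldl, ih, show (d:Int) + -1 = d - 1 from by ring]
      · by_cases h3 : c = ','
        · simp [h1, h2, h3, pvAccum, List.foldl, ih]
        · simp [h1, h2, h3, pvAccum, List.foldl, ih]

-- ===== VERDICT (by name: the statement is the Claim_ definition above) =====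
theorem traduct_spec : Claim_equal_traduct := by
  intro st _ _
  unfold Spec_traduct traduct traduct_alt
  simpa using traduct_fold_eq (fun j => (PySem.Int.ofStr? (String.ofList [j])).getD 0) st.toList 0 []
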